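-- pv_equiv track=rewrite | github.com/minsik1014/bigData_Pokemon | pokemom.py | assign_generation
-- ===== SOURCE A (Python) =====
-- def assign_generation(dex_id: int) -> int:
--     boundaries = {
--         1: 151,
--         2: 251,
--         3: 386,
--         4: 493,
--         5: 649,
--         6: 721,
--         7: 809,
--         8: 905,
--         9: 1010,
--     }
--     for gen, upper in boundaries.items():
--         if dex_id <= upper:
--             return gen
--     return 9
-- ===== SOURCE B (Python) =====
-- import bisect
--
-- _UPPERS = [151, 251, 386, 493, 649, 721, 809, 905, 1010]
--
-- def assign_generation(dex_id: int) -> int: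
--     return min(bisect.bisect_left(_UPPERS, dex_id) + 1, 9)
-- ===== Notes on version B (the rewrite author's own statement) =====
-- stated objective: idiomatic
-- what changed: Replaced the linear scan over a generation->upper dict with a binary search (bisect_left) on a sorted list of upper bounds, capped at 9.
import Mathlib
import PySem

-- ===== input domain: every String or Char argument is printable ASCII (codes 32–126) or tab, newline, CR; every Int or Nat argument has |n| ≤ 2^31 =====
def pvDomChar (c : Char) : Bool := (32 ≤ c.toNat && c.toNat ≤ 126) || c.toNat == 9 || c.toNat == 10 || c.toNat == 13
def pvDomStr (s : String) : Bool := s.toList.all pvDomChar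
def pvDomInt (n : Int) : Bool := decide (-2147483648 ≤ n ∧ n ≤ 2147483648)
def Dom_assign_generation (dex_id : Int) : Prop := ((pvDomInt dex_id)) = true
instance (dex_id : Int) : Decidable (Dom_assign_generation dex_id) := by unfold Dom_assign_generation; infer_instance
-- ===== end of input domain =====

-- B replaces A's linear scan over the generation->upper dict with a bisect_left binary search on the sorted list of upper bounds (idiomatic; identical values).

-- ===== PORT A =====
-- the boundaries dict's items() in insertion order, scanned with early return; fallthrough returns 9
def agScan (d : Int) : List (Int × Int) → Int
  | [] => 9
  | (gen, upper) :: rest => if d ≤ upper then gen else agScan d rest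

def assign_generation (dex_id : Int) : Int :=
  agScan dex_id [(1,151),(2,251),(3,386),(4,493),(5,649),(6,721),(7,809),(8,905),(9,1010)]

-- ===== PORT B =====
-- bisect.bisect_left(xs, x): the standard lo/hi halving loop (exact on any list)
def bisectLeft (xs : List Int) (x : Int) : Nat := go xs.length 0 xs.length
where
  go : Nat → Nat → Nat → Nat
    | 0, lo, _ => lo
    | fuel + 1, lo, hi =>
      if lo < hi then
        let mid := (lo + hi) / 2
        if xs.getD mid 0 < x then go fuel (mid + 1) hi else go fuel lo mid
      else lo

def assign_generation_alt (dex_id : Int) : Int :=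
  min ((bisectLeft [151, 251, 386, 493, 649, 721, 809, 905, 1010] dex_id : Nat) + 1) 9

-- ===== PRECONDITION & SPEC =====
def Spec_assign_generation (dex_id : Int) (out : Int) : Prop := out = assign_generation_alt dex_id
instance (dex_id : Int) (out : Int) : Decidable (Spec_assign_generation dex_id out) := by unfold Spec_assign_generation; infer_instance

-- ===== CLAIM (what is proved, stated in full; the proofs are below) =====
def Claim_equal_assign_generation : Prop := ∀ (dex_id : Int), Dom_assign_generation dex_id → Spec_assign_generation dex_id (assign_generation dex_id)

-- ===== LEMMAS AND PROOFS =====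
-- A's scan evaluates to a chain of interval tests
theorem ag_eval (d : Int) :
    assign_generation d =
      if d ≤ 151 then 1 else if d ≤ 251 then 2 else if d ≤ 386 then 3
      else if d ≤ 493 then 4 else if d ≤ 649 then 5 else if d ≤ 721 then 6
      else if d ≤ 809 then 7 else if d ≤ 905 then 8 else 9 := by
  simp [assign_generation, agScan]

-- B's binary search evaluates to the same chain, by cases on the interval of d
theorem alt_eval (d : Int) :
    assign_generation_alt d =
      if d ≤ 151 then 1 else if d ≤ 251 then 2 else if d ≤ 386 then 3
      else if d ≤ 493 then 4 else if d ≤ 649 then 5 else if d ≤ 721 then 6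
      else if d ≤ 809 then 7 else if d ≤ 905 then 8 else 9 := by
  have u : ∀ f lo hi : Nat, bisectLeft.go [151, 251, 386, 493, 649, 721, 809, 905, 1010] d (f+1) lo hi =
      if lo < hi then
        (if ([151, 251, 386, 493, 649, 721, 809, 905, 1010] : List Int).getD ((lo+hi)/2) 0 < d
         then bisectLeft.go [151, 251, 386, 493, 649, 721, 809, 905, 1010] d f ((lo+hi)/2 + 1) hi
         else bisectLeft.go [151, 251, 386, 493, 649, 721, 809, 905, 1010] d f lo ((lo+hi)/2))
      else lo := fun f lo hi => rfl
  have eT : ∀ f lo hi : Nat, ¬ lo < hi → bisectLeft.go [151, 251, 386, 493, 649, 721, 809, 905, 1010] d (f+1) lo hi = lo := fun f lo hi h => by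
    rw [u]; simp [h]
  have hl : ([151, 251, 386, 493, 649, 721, 809, 905, 1010] : List Int).length = 9 := rfl
  have e9_09 : bisectLeft.go [151, 251, 386, 493, 649, 721, 809, 905, 1010] d 9 0 9 = if (649:Int) < d then bisectLeft.go [151, 251, 386, 493, 649, 721, 809, 905, 1010] d 8 5 9 else bisectLeft.go [151, 251, 386, 493, 649, 721, 809, 905, 1010] d 8 0 4 := by
    rw [show (9:Nat) = 8+1 from rfl, u]; norm_num [List.getD]
  have e8_59 : bisectLeft.go [151, 251, 386, 493, 649, 721, 809, 905, 1010] d 8 5 9 = if (905:Int) < d then bisectLeft.go [151, 251, 386, 493, 649, 721, 809, 905, 1010] d 7 8 9 else bisectLeft.go [151, 251, 386, 493, 649, 721, 809, 905, 1010] d 7 5 7 := by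
    rw [show (8:Nat) = 7+1 from rfl, u]; norm_num [List.getD]
  have e7_57 : bisectLeft.go [151, 251, 386, 493, 649, 721, 809, 905, 1010] d 7 5 7 = if (809:Int) < d then bisectLeft.go [151, 251, 386, 493, 649, 721, 809, 905, 1010] d 6 7 7 else bisectLeft.go [151, 251, 386, 493, 649, 721, 809, 905, 1010] d 6 5 6 := by
    rw [show (7:Nat) = 6+1 from rfl, u]; norm_num [List.getD]
  have e6_56 : bisectLeft.go [151, 251, 386, 493, 649, 721, 809, 905, 1010] d 6 5 6 = if (721:Int) < d then bisectLeft.go [151, 251, 386, 493, 649, 721, 809, 905, 1010] d 5 6 6 else bisectLeft.go [151, 251, 386, 493, 649, 721, 809, 905, 1010] d 5 5 5 := by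
    rw [show (6:Nat) = 5+1 from rfl, u]; norm_num [List.getD]
  have e8_04 : bisectLeft.go [151, 251, 386, 493, 649, 721, 809, 905, 1010] d 8 0 4 = if (386:Int) < d then bisectLeft.go [151, 251, 386, 493, 649, 721, 809, 905, 1010] d 7 3 4 else bisectLeft.go [151, 251, 386, 493, 649, 721, 809, 905, 1010] d 7 0 2 := by
    rw [show (8:Nat) = 7+1 from rfl, u]; norm_num [List.getD]
  have e7_34 : bisectLeft.go [151, 251, 386, 493, 649, 721, 809, 905, 1010] d 7 3 4 = if (493:Int) < d then bisectLeft.go [151, 251, 386, 493, 649, 721, 809, 905, 1010] d 6 4 4 else bisectLeft.go [151, 251, 386, 493, 649, 721, 809, 905, 1010] d 6 3 3 := by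
    rw [show (7:Nat) = 6+1 from rfl, u]; norm_num [List.getD]
  have e7_02 : bisectLeft.go [151, 251, 386, 493, 649, 721, 809, 905, 1010] d 7 0 2 = if (251:Int) < d then bisectLeft.go [151, 251, 386, 493, 649, 721, 809, 905, 1010] d 6 2 2 else bisectLeft.go [151, 251, 386, 493, 649, 721, 809, 905, 1010] d 6 0 1 := by
    rw [show (7:Nat) = 6+1 from rfl, u]; norm_num [List.getD]
  have e6_01 : bisectLeft.go [151, 251, 386, 493, 649, 721, 809, 905, 1010] d 6 0 1 = if (151:Int) < d then bisectLeft.go [151, 251, 386, 493, 649, 721, 809, 905, 1010] d 5 1 1 else bisectLeft.go [151, 251, 386, 493, 649, 721, 809, 905, 1010] d 5 0 0 := by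
    rw [show (6:Nat) = 5+1 from rfl, u]; norm_num [List.getD]
  have e7_89 : bisectLeft.go [151, 251, 386, 493, 649, 721, 809, 905, 1010] d 7 8 9 = if (1010:Int) < d then bisectLeft.go [151, 251, 386, 493, 649, 721, 809, 905, 1010] d 6 9 9 else bisectLeft.go [151, 251, 386, 493, 649, 721, 809, 905, 1010] d 6 8 8 := by
    rw [show (7:Nat) = 6+1 from rfl, u]; norm_num [List.getD]
  unfold assign_generation_alt bisectLeft
  rw [hl]
  by_cases h1 : d ≤ 151
  · rw [e9_09, if_neg (show ¬((649:Int) < d) by omega), e8_04, if_neg (show ¬((386:Int) < d) by omega), e7_02, if_neg (show ¬((251:Int) < d) by omega), e6_01, if_neg (show ¬((151:Int) < d) by omega), eT 4 _ _ (by omega), if_pos h1]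
    norm_num
  by_cases h2 : d ≤ 251
  · rw [e9_09, if_neg (show ¬((649:Int) < d) by omega), e8_04, if_neg (show ¬((386:Int) < d) by omega), e7_02, if_neg (show ¬((251:Int) < d) by omega), e6_01, if_pos (show (151:Int) < d by omega), eT 4 _ _ (by omega), if_neg h1, if_pos h2]
    norm_num
  by_cases h3 : d ≤ 386
  · rw [e9_09, if_neg (show ¬((649:Int) < d) by omega), e8_04, if_neg (show ¬((386:Int) < d) by omega), e7_02, if_pos (show (251:Int) < d by omega), eT 5 _ _ (by omega), if_neg h1, if_neg h2, if_pos h3]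
    norm_num
  by_cases h4 : d ≤ 493
  · rw [e9_09, if_neg (show ¬((649:Int) < d) by omega), e8_04, if_pos (show (386:Int) < d by omega), e7_34, if_neg (show ¬((493:Int) < d) by omega), eT 5 _ _ (by omega), if_neg h1, if_neg h2, if_neg h3, if_pos h4]
    norm_num
  by_cases h5 : d ≤ 649
  · rw [e9_09, if_neg (show ¬((649:Int) < d) by omega), e8_04, if_pos (show (386:Int) < d by omega), e7_34, if_pos (show (493:Int) < d by omega), eT 5 _ _ (by omega), if_neg h1, if_neg h2, if_neg h3, if_neg h4, if_pos h5]
    norm_num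
  by_cases h6 : d ≤ 721
  · rw [e9_09, if_pos (show (649:Int) < d by omega), e8_59, if_neg (show ¬((905:Int) < d) by omega), e7_57, if_neg (show ¬((809:Int) < d) by omega), e6_56, if_neg (show ¬((721:Int) < d) by omega), eT 4 _ _ (by omega), if_neg h1, if_neg h2, if_neg h3, if_neg h4, if_neg h5, if_pos h6]
    norm_num
  by_cases h7 : d ≤ 809
  · rw [e9_09, if_pos (show (649:Int) < d by omega), e8_59, if_neg (show ¬((905:Int) < d) by omega), e7_57, if_neg (show ¬((809:Int) < d) by omega), e6_56, if_pos (show (721:Int) < d by omega), eT 4 _ _ (by omega), if_neg h1, if_neg h2, if_neg h3, if_neg h4, if_neg h5, if_neg h6, if_pos h7]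
    norm_num
  by_cases h8 : d ≤ 905
  · rw [e9_09, if_pos (show (649:Int) < d by omega), e8_59, if_neg (show ¬((905:Int) < d) by omega), e7_57, if_pos (show (809:Int) < d by omega), eT 5 _ _ (by omega), if_neg h1, if_neg h2, if_neg h3, if_neg h4, if_neg h5, if_neg h6, if_neg h7, if_pos h8]
    norm_num
  by_cases h9 : d ≤ 1010
  · rw [e9_09, if_pos (show (649:Int) < d by omega), e8_59, if_pos (show (905:Int) < d by omega), e7_89, if_neg (show ¬((1010:Int) < d) by omega), eT 5 _ _ (by omega), if_neg h1, if_neg h2, if_neg h3, if_neg h4, if_neg h5, if_neg h6, if_neg h7, if_neg h8]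
    norm_num
  · rw [e9_09, if_pos (show (649:Int) < d by omega), e8_59, if_pos (show (905:Int) < d by omega), e7_89, if_pos (show (1010:Int) < d by omega), eT 5 _ _ (by omega), if_neg h1, if_neg h2, if_neg h3, if_neg h4, if_neg h5, if_neg h6, if_neg h7, if_neg h8]
    norm_num
-- ===== VERDICT (by name: the statement is the Claim_ definition above) =====
theorem assign_generation_spec : Claim_equal_assign_generation := by
  intro d _
  unfold Spec_assign_generation
  rw [ag_eval, alt_eval]
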